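-- pv_equiv track=rewrite | github.com/Cicerolibardi/monitorias-mc102 | 2s2022/lab11.py | verificar_existencia
-- ===== SOURCE A (Python) =====
-- def verificar_existencia(tabuleiro, peca):
--     ocorrencias = 0
--     for i in range(len(tabuleiro)):
--         for j in range(len(tabuleiro[0])):
--             quebrou = 0
--             for k in range(len(peca)):
--                 if quebrou == 1:
--                     break
--                 for l in range(len(peca[0])):
--                     if i+k < len(tabuleiro) and j+l < len(tabuleiro[0]):
--                         if (tabuleiro[i+k][j+l] == "X") and (peca[k][l] == "X"):
--                             quebrou = 1
--                             break
--                     else: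
--                         quebrou = 1
--                         break
--
--             if quebrou == 0:
--                 ocorrencias += 1
--
--     return ocorrencias
-- ===== SOURCE B (Python) =====
-- def verificar_existencia(tabuleiro, peca):
--     n = len(tabuleiro)
--     m = len(tabuleiro[0]) if tabuleiro else 0
--     p = len(peca)
--     q = len(peca[0]) if peca else 0
--     if p == 0 or q == 0:
--         # an empty piece (no rows, or zero columns) fits at every board cell
--         return n * m
--     xs = [(k, l) for k in range(p) for l in range(q) if peca[k][l] == "X"]
--     ocorrencias = 0
--     for i in range(n - p + 1):
--         for j in range(m - q + 1):
--             if all(tabuleiro[i + k][j + l] != "X" for (k, l) in xs):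
--                 ocorrencias += 1
--     return ocorrencias
-- ===== Notes on version B (the rewrite author's own statement) =====
-- stated objective: faster
-- what changed: B precomputes the piece's X-cell coordinates once and scans only the offsets where the piece fits inside the board, testing only those X cells, instead of A's four nested loops with per-cell bounds checks and break flags over every board position.
-- outside the precondition, e.g. on verificar_existencia([['O']], [['O'], []]): A returns 0, B raises IndexError
import Mathlib
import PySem

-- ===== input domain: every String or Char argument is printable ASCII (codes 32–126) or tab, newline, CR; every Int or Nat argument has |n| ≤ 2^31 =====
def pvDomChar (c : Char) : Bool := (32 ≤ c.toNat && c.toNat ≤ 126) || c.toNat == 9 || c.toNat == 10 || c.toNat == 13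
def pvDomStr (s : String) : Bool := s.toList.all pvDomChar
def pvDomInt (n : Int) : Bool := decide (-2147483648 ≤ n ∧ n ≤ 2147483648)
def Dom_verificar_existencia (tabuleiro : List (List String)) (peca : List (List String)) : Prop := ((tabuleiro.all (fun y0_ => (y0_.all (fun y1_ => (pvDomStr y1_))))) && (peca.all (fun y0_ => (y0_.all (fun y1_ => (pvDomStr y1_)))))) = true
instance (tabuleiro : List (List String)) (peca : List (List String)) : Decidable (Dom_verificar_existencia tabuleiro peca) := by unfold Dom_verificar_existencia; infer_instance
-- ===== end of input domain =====

-- B replaces A's four nested loops (with per-cell bounds checks and break flags over every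
-- board position) by precomputing the piece's X-cell coordinates once and scanning only the
-- offsets where the piece fits, testing only those X cells (objective: faster, constant factor).

-- ===== PORT A =====
-- grid[i][j]; inside Pre_ every access A performs is in range, so the default is never returned
def pvCell (g : List (List String)) (i j : Nat) : String := (g.getD i []).getD j ""

-- the 'for l in range(len(peca[0]))' loop; returns the value of 'quebrou' (true = broke)
def pvA_row (tab peca : List (List String)) (N M : Nat) (i j k : Nat) : List Nat → Bool
  | [] => false
  | l :: ls =>
    if i + k < N ∧ j + l < M then
      if pvCell tab (i + k) (j + l) = "X" ∧ pvCell peca k l = "X" then true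
      else pvA_row tab peca N M i j k ls
    else true

-- the 'for k in range(len(peca))' loop with its 'if quebrou == 1: break'
def pvA_piece (tab peca : List (List String)) (N M Q : Nat) (i j : Nat) : List Nat → Bool
  | [] => false
  | k :: ks =>
    if pvA_row tab peca N M i j k (List.range Q) then true
    else pvA_piece tab peca N M Q i j ks

def verificar_existencia (tabuleiro : List (List String)) (peca : List (List String)) : Int :=
  -- len(tabuleiro[0]) / len(peca[0]) are only evaluated by Python when the list is nonempty;
  -- headD [] renders them totally (length 0 when empty, in which case the loops do not run)
  (List.range tabuleiro.length).foldl (fun acc i =>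
    (List.range (tabuleiro.headD []).length).foldl (fun acc j =>
      if pvA_piece tabuleiro peca tabuleiro.length (tabuleiro.headD []).length
          (peca.headD []).length i j (List.range peca.length) then acc else acc + 1) acc) 0

-- ===== PORT B =====
-- the list comprehension: coordinates of the piece's X cells
def pvB_xs (peca : List (List String)) (p q : Nat) : List (Nat × Nat) :=
  (List.range p).flatMap (fun k => (List.range q).filterMap (fun l =>
    if pvCell peca k l = "X" then some (k, l) else none))

-- the all(...) generator
def pvB_ok (tab : List (List String)) (xs : List (Nat × Nat)) (i j : Nat) : Bool :=
  xs.all (fun kl => !(pvCell tab (i + kl.1) (j + kl.2) == "X"))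

def verificar_existencia_alt (tabuleiro : List (List String)) (peca : List (List String)) : Int :=
  if peca.length = 0 ∨ (peca.headD []).length = 0 then
    ((tabuleiro.length * (tabuleiro.headD []).length : Nat) : Int)
  else
    -- List.range (n + 1 - p) = Python's range(n - p + 1) (empty when p > n)
    (List.range (tabuleiro.length + 1 - peca.length)).foldl (fun acc i =>
      (List.range ((tabuleiro.headD []).length + 1 - (peca.headD []).length)).foldl (fun acc j =>
        if pvB_ok tabuleiro (pvB_xs peca peca.length (peca.headD []).length) i j
        then acc + 1 else acc) acc) 0

-- ===== PRECONDITION & SPEC =====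
-- Pre_ excludes ragged grids when the piece has at least one row and one column: there a row of
-- tabuleiro or peca shorter than its first row can make Python A raise IndexError (and whether it
-- does depends on where the X cells sit, which is not a closed-form condition on the shape alone).
def Pre_verificar_existencia (tabuleiro : List (List String)) (peca : List (List String)) : Prop :=
  peca.length = 0 ∨ (peca.headD []).length = 0 ∨
    ((∀ r ∈ tabuleiro, (tabuleiro.headD []).length ≤ r.length) ∧
     (∀ r ∈ peca, (peca.headD []).length ≤ r.length))
instance (tabuleiro : List (List String)) (peca : List (List String)) : Decidable (Pre_verificar_existencia tabuleiro peca) := by unfold Pre_verificar_existencia; infer_instance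

def pvWitness_verificar_existencia : List (List String) × List (List String) :=
  ([["X", "O"], ["O", "O"]], [["X"]])

def Spec_verificar_existencia (tabuleiro : List (List String)) (peca : List (List String)) (out : Int) : Prop := out = verificar_existencia_alt tabuleiro peca
instance (tabuleiro : List (List String)) (peca : List (List String)) (out : Int) : Decidable (Spec_verificar_existencia tabuleiro peca out) := by unfold Spec_verificar_existencia; infer_instance

-- ===== CLAIM (what is proved, stated in full; the proofs are below) =====
def Claim_equal_verificar_existencia : Prop := ∀ (tabuleiro : List (List String)) (peca : List (List String)), Dom_verificar_existencia tabuleiro peca → Pre_verificar_existencia tabuleiro peca → Spec_verificar_existencia tabuleiro peca (verificar_existencia tabuleiro peca)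

-- ===== LEMMAS AND PROOFS =====


-- A counted position keeps acc, a broken one adds 1: inner loop as a sum
theorem pv_foldl_if_sumA {α : Type} (f : α → Bool) :
    ∀ (xs : List α) (a : Int),
      xs.foldl (fun acc x => if f x then acc else acc + 1) a
        = a + (xs.map (fun x => if f x then (0 : Int) else 1)).sum := by
  intro xs
  induction xs with
  | nil => intro a; simp
  | cons x xs ih =>
    intro a
    by_cases h : f x = true <;> simp [h, ih, add_assoc]

theorem pv_foldl_if_sumB {α : Type} (f : α → Bool) :
    ∀ (xs : List α) (a : Int),
      xs.foldl (fun acc x => if f x then acc + 1 else acc) a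
        = a + (xs.map (fun x => if f x then (1 : Int) else 0)).sum := by
  intro xs
  induction xs with
  | nil => intro a; simp
  | cons x xs ih =>
    intro a
    by_cases h : f x = true <;> simp [h, ih, add_assoc]

theorem pv_foldl_body {α : Type} (F : Int → α → Int) (G : α → Int)
    (h : ∀ a x, F a x = a + G x) :
    ∀ (xs : List α) (a : Int), xs.foldl F a = a + (xs.map G).sum := by
  intro xs
  induction xs with
  | nil => intro a; simp
  | cons x xs ih => intro a; simp [h, ih, add_assoc]

theorem pv_listsum_range (f : Nat → Int) :
    ∀ n, ((List.range n).map f).sum = ∑ i ∈ Finset.range n, f i := by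
  intro n
  induction n with
  | zero => simp
  | succ n ih => simp [List.range_succ, Finset.sum_range_succ, ih]

theorem pv_sum_trunc (f : Nat → Int) (K N : Nat) (hK : K ≤ N)
    (h0 : ∀ i, K ≤ i → f i = 0) :
    ∑ i ∈ Finset.range N, f i = ∑ i ∈ Finset.range K, f i := by
  symm
  refine Finset.sum_subset ?_ ?_
  · intro x hx
    simp only [Finset.mem_range] at *
    omega
  · intro i _ hni
    exact h0 i (le_of_not_gt (by simpa [Finset.mem_range] using hni))

theorem pvA_row_false_iff (tab peca : List (List String)) (N M i j k : Nat) :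
    ∀ ls, pvA_row tab peca N M i j k ls = false ↔
      ∀ l ∈ ls, i + k < N ∧ j + l < M ∧
        ¬(pvCell tab (i + k) (j + l) = "X" ∧ pvCell peca k l = "X") := by
  intro ls
  induction ls with
  | nil => simp [pvA_row]
  | cons l ls ih =>
    simp only [pvA_row]
    by_cases hb : i + k < N ∧ j + l < M
    · rw [if_pos hb]
      by_cases hx : pvCell tab (i + k) (j + l) = "X" ∧ pvCell peca k l = "X"
      · rw [if_pos hx]
        simp only [List.mem_cons]
        constructor
        · intro h; cases h
        · intro h; exact absurd hx (h l (Or.inl rfl)).2.2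
      · rw [if_neg hx]
        simp only [List.mem_cons, ih]
        constructor
        · rintro h l' (rfl | hl')
          · exact ⟨hb.1, hb.2, hx⟩
          · exact h l' hl'
        · intro h l' hl'; exact h l' (Or.inr hl')
    · rw [if_neg hb]
      constructor
      · intro h; cases h
      · intro h
        exact absurd ⟨(h l (by simp)).1, (h l (by simp)).2.1⟩ hb

theorem pvA_piece_false_iff (tab peca : List (List String)) (N M Q i j : Nat) :
    ∀ ks, pvA_piece tab peca N M Q i j ks = false ↔
      ∀ k ∈ ks, pvA_row tab peca N M i j k (List.range Q) = false := by
  intro ks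
  induction ks with
  | nil => simp [pvA_piece]
  | cons k ks ih =>
    simp only [pvA_piece]
    by_cases hr : pvA_row tab peca N M i j k (List.range Q) = true
    · rw [if_pos hr]
      simp only [List.mem_cons]
      constructor
      · intro h; cases h
      · intro h
        have := h k (Or.inl rfl)
        simp [this] at hr
    · rw [if_neg hr]
      simp only [List.mem_cons, ih]
      constructor
      · rintro h k' (rfl | hk')
        · exact Bool.eq_false_iff.2 hr
        · exact h k' hk'
      · intro h k' hk'; exact h k' (Or.inr hk')

theorem pv_mem_pvB_xs (peca : List (List String)) (p q k l : Nat) :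
    (k, l) ∈ pvB_xs peca p q ↔ k < p ∧ l < q ∧ pvCell peca k l = "X" := by
  simp only [pvB_xs, List.mem_flatMap, List.mem_filterMap, List.mem_range]
  constructor
  · rintro ⟨k', hk', l', hl', h⟩
    by_cases hx : pvCell peca k' l' = "X"
    · rw [if_pos hx] at h
      simp only [Option.some.injEq, Prod.mk.injEq] at h
      obtain ⟨rfl, rfl⟩ := h
      exact ⟨hk', hl', hx⟩
    · rw [if_neg hx] at h
      cases h
  · rintro ⟨hk, hl, hX⟩
    exact ⟨k, hk, l, hl, by simp [hX]⟩

theorem pvB_ok_iff (tab : List (List String)) (xs : List (Nat × Nat)) (i j : Nat) :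
    pvB_ok tab xs i j = true ↔ ∀ kl ∈ xs, ¬(pvCell tab (i + kl.1) (j + kl.2) = "X") := by
  simp [pvB_ok]

-- pointwise: when the piece fits at (i, j), A's quebrou = 0 iff B's all(...) holds
theorem pv_point_fit (tab peca : List (List String)) (n m p q i j : Nat)
    (hi : i + p ≤ n) (hj : j + q ≤ m) :
    (pvA_piece tab peca n m q i j (List.range p) = false ↔
      pvB_ok tab (pvB_xs peca p q) i j = true) := by
  rw [pvA_piece_false_iff, pvB_ok_iff]
  constructor
  · intro h kl hkl
    obtain ⟨k, l⟩ := kl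
    obtain ⟨hk, hl, hpec⟩ := (pv_mem_pvB_xs peca p q k l).1 hkl
    have := ((pvA_row_false_iff tab peca n m i j k (List.range q)).1
      (h k (List.mem_range.2 hk))) l (List.mem_range.2 hl)
    intro htab
    exact this.2.2 ⟨htab, hpec⟩
  · intro h k hk
    rw [pvA_row_false_iff]
    intro l hl
    have hk' := List.mem_range.1 hk
    have hl' := List.mem_range.1 hl
    refine ⟨by omega, by omega, ?_⟩
    rintro ⟨htab, hpec⟩
    exact h (k, l) ((pv_mem_pvB_xs peca p q k l).2 ⟨hk', hl', hpec⟩) htab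

-- pointwise: when the piece does not fit at (i, j) (and is nonempty), A's quebrou = 1
theorem pv_point_nofit (tab peca : List (List String)) (n m p q i j : Nat)
    (hp : 0 < p) (hq : 0 < q) (h : n < i + p ∨ m < j + q) :
    pvA_piece tab peca n m q i j (List.range p) = true := by
  rcases Bool.eq_false_or_eq_true (pvA_piece tab peca n m q i j (List.range p)) with ht | hf
  · exact ht
  · exfalso
    rw [pvA_piece_false_iff] at hf
    rcases h with h | h
    · have hrow := hf (p - 1) (List.mem_range.2 (by omega))
      rw [pvA_row_false_iff] at hrow
      have := hrow 0 (List.mem_range.2 hq)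
      omega
    · have hrow := hf 0 (List.mem_range.2 hp)
      rw [pvA_row_false_iff] at hrow
      have := hrow (q - 1) (List.mem_range.2 (by omega))
      omega

-- degenerate piece (no rows or zero columns): A never breaks
theorem pv_piece_degenerate (tab peca : List (List String)) (n m p q i j : Nat)
    (h : p = 0 ∨ q = 0) :
    pvA_piece tab peca n m q i j (List.range p) = false := by
  rw [pvA_piece_false_iff]
  intro k hk
  rcases h with h | h
  · simp [h] at hk
  · rw [pvA_row_false_iff]
    intro l hl
    simp [h] at hl

-- A as a double sum over the full board
theorem pv_A_as_sum (tab peca : List (List String)) :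
    verificar_existencia tab peca =
      ∑ i ∈ Finset.range tab.length, ∑ j ∈ Finset.range (tab.headD []).length,
        (if pvA_piece tab peca tab.length (tab.headD []).length (peca.headD []).length i j
            (List.range peca.length) then (0 : Int) else 1) := by
  unfold verificar_existencia
  rw [pv_foldl_body _ _ (fun a i => pv_foldl_if_sumA _ _ a), zero_add, pv_listsum_range]
  refine Finset.sum_congr rfl fun i _ => ?_
  rw [pv_listsum_range]

-- B (nonempty piece) as a double sum over the fitting offsets
theorem pv_B_as_sum (tab peca : List (List String))
    (hp : ¬(peca.length = 0 ∨ (peca.headD []).length = 0)) :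
    verificar_existencia_alt tab peca =
      ∑ i ∈ Finset.range (tab.length + 1 - peca.length),
        ∑ j ∈ Finset.range ((tab.headD []).length + 1 - (peca.headD []).length),
          (if pvB_ok tab (pvB_xs peca peca.length (peca.headD []).length) i j
           then (1 : Int) else 0) := by
  unfold verificar_existencia_alt
  rw [if_neg hp]
  rw [pv_foldl_body _ _ (fun a i => pv_foldl_if_sumB _ _ a), zero_add, pv_listsum_range]
  refine Finset.sum_congr rfl fun i _ => ?_
  rw [pv_listsum_range]


-- ===== VERDICT (by name: the statement is the Claim_ definition above) =====
theorem verificar_existencia_spec : Claim_equal_verificar_existencia := by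
  intro tab peca _ _
  unfold Spec_verificar_existencia
  by_cases hdeg : peca.length = 0 ∨ (peca.headD []).length = 0
  · -- degenerate piece: both sides count every board cell
    rw [pv_A_as_sum]
    unfold verificar_existencia_alt
    rw [if_pos hdeg]
    have hone : (∑ i ∈ Finset.range tab.length, ∑ j ∈ Finset.range (tab.headD []).length,
        (if pvA_piece tab peca tab.length (tab.headD []).length (peca.headD []).length i j
            (List.range peca.length) then (0 : Int) else 1))
        = ∑ _i ∈ Finset.range tab.length, ∑ _j ∈ Finset.range (tab.headD []).length, (1 : Int) :=
      Finset.sum_congr rfl fun i _ => Finset.sum_congr rfl fun j _ => by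
        rw [pv_piece_degenerate tab peca _ _ _ _ i j hdeg]; simp
    rw [hone]
    simp [Finset.sum_const]
  · rw [pv_A_as_sum, pv_B_as_sum tab peca hdeg]
    obtain ⟨hp, hq⟩ := not_or.1 hdeg
    set n := tab.length with hn
    set m := (tab.headD []).length with hm
    set p := peca.length with hpdef
    set q := (peca.headD []).length with hqdef
    have hp0 : 0 < p := Nat.pos_of_ne_zero hp
    have hq0 : 0 < q := Nat.pos_of_ne_zero hq
    -- truncate the outer sum: rows where the piece sticks out contribute 0
    rw [pv_sum_trunc _ (n + 1 - p) n (by omega) ?hz]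
    case hz =>
      intro i hi
      refine Finset.sum_eq_zero fun j _ => ?_
      rw [pv_point_nofit tab peca n m p q i j hp0 hq0 (Or.inl (by omega))]
      simp
    refine Finset.sum_congr rfl fun i hi => ?_
    have hi' : i + p ≤ n := by have := Finset.mem_range.1 hi; omega
    rw [pv_sum_trunc _ (m + 1 - q) m (by omega) ?hz2]
    case hz2 =>
      intro j hj
      rw [pv_point_nofit tab peca n m p q i j hp0 hq0 (Or.inr (by omega))]
      simp
    refine Finset.sum_congr rfl fun j hj => ?_
    have hj' : j + q ≤ m := by have := Finset.mem_range.1 hj; omega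
    have hpt := pv_point_fit tab peca n m p q i j hi' hj'
    by_cases hok : pvB_ok tab (pvB_xs peca p q) i j = true
    · rw [hpt.2 hok, if_neg (by simp), if_pos hok]
    · rw [if_neg hok, if_pos ?_]
      rcases Bool.eq_false_or_eq_true (pvA_piece tab peca n m q i j (List.range p)) with h | h
      · exact h
      · exact absurd (hpt.1 h) hok
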